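-- pv_equiv track=rewrite | github.com/chbauman/StoryTime | lib/util.py | find_new_name
-- ===== SOURCE A (Python) =====
-- from typing import List, Callable, Sequence
--
-- def find_new_name(img_name: str, same_date_file_list: List[str], ext: str) -> str:
--     """Chooses a new filename that is not in the list and
--     contains the img_name in the beginning by appending an
--     int to the filename separated by an underscore.
--     """
--     for k in range(10000):
--         new_name = img_name + "_" + str(k) + ext
--         try:
--             same_date_file_list.index(new_name)
--         except ValueError:
--             return img_name + "_" + str(k)
--
--     # If there are already more than 10000 images, gives up.
--     raise ValueError("ERROR: Way too many fucking images.")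
-- ===== SOURCE B (Python) =====
-- def _dec_suffix(mid):
--     """Value of mid if it is the canonical decimal form of a nonnegative int, else None."""
--     if not mid or not all("0" <= c <= "9" for c in mid):
--         return None
--     if mid[0] == "0" and len(mid) > 1:
--         return None
--     v = 0
--     for c in mid:
--         v = 10 * v + (ord(c) - 48)
--     return v
--
--
-- def find_new_name(img_name, same_date_file_list, ext):
--     """Chooses a new filename that is not in the list and
--     contains the img_name in the beginning by appending an
--     int to the filename separated by an underscore.
--     """
--     pref = img_name + "_"
--     used = set()
--     for name in same_date_file_list:
--         if name.startswith(pref) and name.endswith(ext):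
--             v = _dec_suffix(name[len(pref):len(name) - len(ext)])
--             if v is not None:
--                 used.add(v)
--     # minimal excludant of `used`: scan the sorted values for the first gap
--     mex = 0
--     for v in sorted(used):
--         if v == mex:
--             mex += 1
--     if mex >= 10000:
--         raise ValueError("ERROR: Way too many fucking images.")
--     return pref + str(mex)
-- ===== Notes on version B (the rewrite author's own statement) =====
-- stated objective: alternative
-- what changed: B never enumerates candidate indices: one pass extracts each listed name's canonical decimal suffix with a hand-written parser, then the answer is computed as the minimal excludant of that suffix set by sorting it and scanning for the first gap, instead of A's loop over k=0..9999 that re-scans the whole list with list.index per candidate.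
import Mathlib
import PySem

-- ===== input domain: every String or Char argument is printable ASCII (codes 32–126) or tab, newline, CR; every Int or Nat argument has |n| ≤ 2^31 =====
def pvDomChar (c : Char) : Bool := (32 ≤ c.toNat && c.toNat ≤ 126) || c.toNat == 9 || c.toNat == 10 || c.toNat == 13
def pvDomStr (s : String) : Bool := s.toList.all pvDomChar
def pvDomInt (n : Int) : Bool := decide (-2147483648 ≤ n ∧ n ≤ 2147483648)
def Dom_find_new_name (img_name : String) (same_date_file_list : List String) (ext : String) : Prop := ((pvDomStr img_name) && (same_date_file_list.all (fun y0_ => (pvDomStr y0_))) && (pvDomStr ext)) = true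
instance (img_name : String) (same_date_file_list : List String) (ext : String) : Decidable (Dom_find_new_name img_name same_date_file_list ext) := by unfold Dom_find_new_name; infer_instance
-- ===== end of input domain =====

-- B drops A's candidate loop entirely: one pass extracts each name's canonical decimal
-- suffix, then the result is the minimal excludant of that set, found by sorting it and
-- scanning for the first gap (objective: alternative algorithm, same observable result).

-- ===== PORT A =====
-- the 'for k in range(10000)' loop; 'same_date_file_list.index(new_name)' raising ValueError = index? = none
def find_new_name_loopA (img_name : String) (same_date_file_list : List String) (ext : String) : List Int → Option String
  | [] => none
  | k :: ks =>
    let new_name := img_name ++ "_" ++ PySem.Int.toStr k ++ ext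
    match PySem.List.index? same_date_file_list new_name with
    | some _ => find_new_name_loopA img_name same_date_file_list ext ks
    | none => some (img_name ++ "_" ++ PySem.Int.toStr k)

-- falling off the loop raises ValueError (excluded by Pre_); .getD "" only totalises the port
def find_new_name (img_name : String) (same_date_file_list : List String) (ext : String) : String :=
  (find_new_name_loopA img_name same_date_file_list ext (PySem.List.pyRange 0 10000 1)).getD ""

-- ===== PORT B =====
-- _dec_suffix(mid) of Source B, on List Char
def fnn_decSuffix (cs : List Char) : Option Int :=
  if cs = [] ∨ ¬ cs.all (fun c => '0' ≤ c && c ≤ '9') then none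
  else if cs.head? = some '0' ∧ 1 < cs.length then none
  else some (cs.foldl (fun v c => 10 * v + ((c.toNat : Int) - 48)) 0)

-- name[len(pref):len(name) - len(ext)]
def find_new_name_mid (pref ext name : String) : String :=
  PySem.Str.slice name (some (PySem.Str.len pref)) (some (PySem.Str.len name - PySem.Str.len ext))

-- the first loop of Source B: the set 'used' of parsed suffix values
def find_new_name_used (pref ext : String) (same_date_file_list : List String) : PySem.Set Int :=
  same_date_file_list.foldl
    (fun used name =>
      if PySem.Str.startswith name pref && PySem.Str.endswith name ext then
        match fnn_decSuffix (find_new_name_mid pref ext name).toList with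
        | some v => PySem.Set.add used v
        | none => used
      else used)
    PySem.Set.empty

-- falling off with mex >= 10000 raises ValueError (excluded by Pre_); "" only totalises the port
def find_new_name_alt (img_name : String) (same_date_file_list : List String) (ext : String) : String :=
  let pref := img_name ++ "_"
  let used := find_new_name_used pref ext same_date_file_list
  let mex := (PySem.List.sorted used (fun v => v) false).foldl (fun m v => if v = m then m + 1 else m) 0
  if 10000 ≤ mex then "" else pref ++ PySem.Int.toStr mex

-- ===== PRECONDITION & SPEC =====
-- Pre_: exactly the inputs on which A returns (A raises ValueError iff every one of the 10000
-- distinct candidate names already occurs in the list; a list shorter than 10000 cannot contain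
-- them all, so the first disjunct is a special case of the second — it only keeps the instance
-- cheap to evaluate)
def Pre_find_new_name (img_name : String) (same_date_file_list : List String) (ext : String) : Prop :=
  same_date_file_list.length < 10000 ∨
    ∃ k ∈ List.range 10000, (img_name ++ "_" ++ PySem.Int.toStr (k : Int) ++ ext) ∉ same_date_file_list
instance (img_name : String) (same_date_file_list : List String) (ext : String) : Decidable (Pre_find_new_name img_name same_date_file_list ext) := by unfold Pre_find_new_name; infer_instance

def pvWitness_find_new_name : String × List String × String := ("img", (["img_0.jpg", "other"], ".jpg"))

def Spec_find_new_name (img_name : String) (same_date_file_list : List String) (ext : String) (out : String) : Prop := out = find_new_name_alt img_name same_date_file_list ext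
instance (img_name : String) (same_date_file_list : List String) (ext : String) (out : String) : Decidable (Spec_find_new_name img_name same_date_file_list ext out) := by unfold Spec_find_new_name; infer_instance

-- ===== CLAIM (what is proved, stated in full; the proofs are below) =====
def Claim_equal_find_new_name : Prop := ∀ (img_name : String) (same_date_file_list : List String) (ext : String), Dom_find_new_name img_name same_date_file_list ext → Pre_find_new_name img_name same_date_file_list ext → Spec_find_new_name img_name same_date_file_list ext (find_new_name img_name same_date_file_list ext)

-- ===== LEMMAS AND PROOFS =====

theorem fnn_toDigitsCore_ne_nil (b f n : Nat) (acc : List Char) (h : f ≠ 0 ∨ acc ≠ []) :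
    Nat.toDigitsCore b f n acc ≠ [] := by
  induction f generalizing n acc with
  | zero => rw [Nat.toDigitsCore]; tauto
  | succ f ih =>
    rw [Nat.toDigitsCore]
    split
    · simp
    · exact ih _ _ (Or.inr (by simp))

theorem fnn_toChars_ne_nil (k : Int) : PySem.Int.toChars k ≠ [] := by
  show (if k < 0 then '-' :: Nat.toDigits 10 k.natAbs else Nat.toDigits 10 k.toNat) ≠ []
  split
  · simp
  · exact fnn_toDigitsCore_ne_nil 10 _ _ [] (Or.inl (by simp))

theorem fnn_toChars_of_nonneg (k : Int) (hk : 0 ≤ k) :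
    PySem.Int.toChars k = Nat.toDigits 10 k.toNat := by
  show (if k < 0 then '-' :: Nat.toDigits 10 k.natAbs else Nat.toDigits 10 k.toNat)
      = Nat.toDigits 10 k.toNat
  rw [if_neg (by omega)]

-- the central string fact: a name passes B's prefix/suffix test with middle slice s (s ≠ [])
-- exactly when it IS pref ++ s ++ extn  (list-of-chars level)
theorem fnn_mid_iff (pref extn s name : List Char) (hs : s ≠ []) :
    (pref <+: name ∧ extn <:+ name ∧
      PySem.List.slice name (some (pref.length : Int)) (some ((name.length : Int) - (extn.length : Int))) = s)
    ↔ name = pref ++ s ++ extn := by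
  constructor
  · rintro ⟨hp, he, hsl⟩
    have hel : extn.length ≤ name.length := he.length_le
    have hcast : (name.length : Int) - (extn.length : Int) = ((name.length - extn.length : Nat) : Int) := by omega
    rw [hcast, PySem.List.slice_natCast] at hsl
    have hm : 0 < name.length - extn.length - pref.length := by
      by_contra hle
      have : name.length - extn.length - pref.length = 0 := by omega
      rw [this] at hsl
      simp at hsl
      exact hs hsl
    have hpref : pref = name.take pref.length := List.prefix_iff_eq_take.mp hp
    have hsuf : extn = name.drop (name.length - extn.length) := List.suffix_iff_eq_drop.mp he
    have hsplit : pref.length + (name.length - extn.length - pref.length) = name.length - extn.length := by omega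
    calc name = name.take (name.length - extn.length) ++ name.drop (name.length - extn.length) := (List.take_append_drop _ _).symm
      _ = (name.take pref.length ++ (name.drop pref.length).take (name.length - extn.length - pref.length)) ++ name.drop (name.length - extn.length) := by
            rw [← List.take_add, hsplit]
      _ = pref ++ s ++ extn := by rw [← hpref, hsl, ← hsuf, List.append_assoc]
  · intro h
    subst h
    refine ⟨⟨s ++ extn, by simp⟩, ⟨pref ++ s, by simp⟩, ?_⟩
    have hlen : ((pref ++ s ++ extn).length : Int) - (extn.length : Int) = ((pref.length + s.length : Nat) : Int) := by
      simp; omega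
    rw [hlen, PySem.List.slice_natCast]
    simp

-- the same fact at String level, phrased on B's tests
theorem fnn_mid_iff_str (pref ext s name : String) (hs : s.toList ≠ []) :
    ((PySem.Str.startswith name pref && PySem.Str.endswith name ext) = true ∧
      find_new_name_mid pref ext name = s)
    ↔ name = pref ++ s ++ ext := by
  rw [← String.toList_inj (s₁ := name)]
  simp only [String.toList_append]
  rw [← fnn_mid_iff pref.toList ext.toList s.toList name.toList hs]
  constructor
  · rintro ⟨hc, hm⟩
    rw [Bool.and_eq_true] at hc
    refine ⟨(PySem.Chars.startswith_iff _ _).mp (by simpa using hc.1),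
            (PySem.Chars.endswith_iff _ _).mp (by simpa using hc.2), ?_⟩
    rw [← String.toList_inj] at hm
    simpa [find_new_name_mid, PySem.Str.toList_slice] using hm
  · rintro ⟨hp, he, hsl⟩
    refine ⟨by
      rw [Bool.and_eq_true]
      constructor
      · simpa using (PySem.Chars.startswith_iff name.toList pref.toList).mpr hp
      · simpa using (PySem.Chars.endswith_iff name.toList ext.toList).mpr he, ?_⟩
    rw [← String.toList_inj]
    simpa [find_new_name_mid, PySem.Str.toList_slice] using hsl

-- ---- the parser characterises canonical decimal forms ----

theorem fnn_digitChar_eq (c : Char) (h0 : '0' ≤ c) (h9 : c ≤ '9') :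
    Nat.digitChar (c.toNat - 48) = c := by
  have h1 : 48 ≤ c.toNat := h0
  have h2 : c.toNat ≤ 57 := h9
  rw [← Char.ofNat_toNat c]
  set m := c.toNat with hm
  interval_cases m <;> decide

theorem fnn_digitChar_toNat (m : Nat) (hm : m < 10) : (Nat.digitChar m).toNat = m + 48 := by
  interval_cases m <;> decide

theorem fnn_digitChar_digit (m : Nat) (hm : m < 10) :
    ('0' ≤ Nat.digitChar m ∧ Nat.digitChar m ≤ '9') := by
  interval_cases m <;> exact ⟨by decide, by decide⟩

-- the step lemma: appending one more digit to an accepted positive numeral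
theorem fnn_decSuffix_append (ds : List Char) (c : Char) (v : Int)
    (hds : fnn_decSuffix ds = some v) (hv : 1 ≤ v) (h0 : '0' ≤ c) (h9 : c ≤ '9') :
    fnn_decSuffix (ds ++ [c]) = some (10 * v + ((c.toNat : Int) - 48)) := by
  unfold fnn_decSuffix at hds ⊢
  by_cases hbad : ds = [] ∨ ¬ ds.all (fun c => '0' ≤ c && c ≤ '9') = true
  · rw [if_pos hbad] at hds; exact absurd hds (by simp)
  rw [if_neg hbad] at hds
  push_neg at hbad
  obtain ⟨hne, hall⟩ := hbad
  by_cases hlz : ds.head? = some '0' ∧ 1 < ds.length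
  · rw [if_pos hlz] at hds; exact absurd hds (by simp)
  rw [if_neg hlz] at hds
  have hfold : ds.foldl (fun v c => 10 * v + ((c.toNat : Int) - 48)) 0 = v := by
    simpa using hds
  have hall2 : (ds ++ [c]).all (fun c => '0' ≤ c && c ≤ '9') = true := by
    simp only [List.all_append, Bool.and_eq_true, hall, true_and, List.all_cons, List.all_nil,
      Bool.and_true]
    exact ⟨by simpa using h0, by simpa using h9⟩
  rw [if_neg (by simp [hall2])]
  have hhead : (ds ++ [c]).head? = ds.head? := by
    cases ds with
    | nil => exact absurd rfl hne
    | cons d t => rfl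
  have hdne : ds.head? ≠ some '0' := by
    rcases List.exists_cons_of_ne_nil hne with ⟨d, t, rfl⟩
    cases t with
    | cons e t' =>
      intro hcon
      exact hlz ⟨hcon, by simp⟩
    | nil =>
      -- single digit with value ≥ 1
      intro hcon
      simp only [List.head?_cons, Option.some.injEq] at hcon
      subst hcon
      simp only [List.foldl_cons, List.foldl_nil] at hfold
      have h48 : ((('0' : Char).toNat : Int)) = 48 := by decide
      rw [h48] at hfold
      omega
  rw [if_neg (by rw [hhead]; exact fun hc => hdne hc.1)]
  rw [List.foldl_append, hfold]
  rfl

theorem fnn_decSuffix_toDigits (n : Nat) : fnn_decSuffix (Nat.toDigits 10 n) = some (n : Int) := by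
  induction n using Nat.strong_induction_on with
  | _ n ih =>
    by_cases h10 : n < 10
    · interval_cases n <;> decide
    · rw [Nat.toDigits_of_base_le (by norm_num) (by omega)]
      have hmod : n % 10 < 10 := Nat.mod_lt _ (by norm_num)
      have hd := fnn_digitChar_digit (n % 10) hmod
      have hdiv1 : 1 ≤ n / 10 := by omega
      have hstep := fnn_decSuffix_append _ _ _ (ih (n / 10) (by omega))
        (by exact_mod_cast hdiv1) hd.1 hd.2
      rw [hstep, fnn_digitChar_toNat (n % 10) hmod]
      congr 1
      push_cast
      omega

-- accepted strings have positive value when nonempty-headed by a nonzero digit: fold lower bound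
theorem fnn_fold_le (cs : List Char) (a : Int) (ha : 0 ≤ a)
    (hd : ∀ c ∈ cs, ('0' ≤ c ∧ c ≤ '9')) :
    a ≤ cs.foldl (fun v c => 10 * v + ((c.toNat : Int) - 48)) a := by
  induction cs generalizing a with
  | nil => exact le_refl a
  | cons c rest ih =>
    have hc := hd c (by simp)
    have h48 : (48 : Int) ≤ (c.toNat : Int) := by
      have : ('0' : Char).toNat ≤ c.toNat := by
        exact Nat.le_of_lt_succ (Nat.lt_succ_of_le (by exact_mod_cast hc.1))
      exact_mod_cast this
    have hstep : a ≤ 10 * a + ((c.toNat : Int) - 48) := by omega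
    calc a ≤ 10 * a + ((c.toNat : Int) - 48) := hstep
      _ ≤ _ := ih _ (by omega) (fun d hdm => hd d (by simp [hdm]))

theorem fnn_decSuffix_sound (cs : List Char) (v : Int) (h : fnn_decSuffix cs = some v) :
    0 ≤ v ∧ cs = Nat.toDigits 10 v.toNat := by
  induction cs using List.reverseRecOn generalizing v with
  | nil => simp [fnn_decSuffix] at h
  | append_singleton ds c ih =>
    unfold fnn_decSuffix at h
    by_cases hbad : ds ++ [c] = [] ∨ ¬ (ds ++ [c]).all (fun c => '0' ≤ c && c ≤ '9') = true
    · rw [if_pos hbad] at h; exact absurd h (by simp)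
    rw [if_neg hbad] at h
    push_neg at hbad
    obtain ⟨-, hall⟩ := hbad
    simp only [List.all_append, List.all_cons, List.all_nil, Bool.and_true, Bool.and_eq_true] at hall
    obtain ⟨hallds, hc⟩ := hall
    have hc0 : '0' ≤ c := of_decide_eq_true hc.1
    have hc9 : c ≤ '9' := of_decide_eq_true hc.2
    have hcN : 48 ≤ c.toNat ∧ c.toNat ≤ 57 := ⟨hc0, hc9⟩
    by_cases hlz : (ds ++ [c]).head? = some '0' ∧ 1 < (ds ++ [c]).length
    · rw [if_pos hlz] at h; exact absurd h (by simp)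
    rw [if_neg hlz] at h
    have hfold : (ds ++ [c]).foldl (fun v c => 10 * v + ((c.toNat : Int) - 48)) 0 = v := by
      simpa using h
    rw [List.foldl_append] at hfold
    cases ds with
    | nil =>
      simp only [List.foldl_nil, List.foldl_cons] at hfold
      have hv0 : 0 ≤ v := by omega
      have hvn : v.toNat = c.toNat - 48 := by omega
      have hvlt : v.toNat < 10 := by omega
      refine ⟨hv0, ?_⟩
      rw [Nat.toDigits_of_lt_base (by omega), hvn, fnn_digitChar_eq c hc0 hc9]
      rfl
    | cons d t =>
      -- the init part d :: t is itself accepted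
      have hdsne : (d :: t : List Char) ≠ [] := by simp
      have hdhead : (d :: t : List Char).head? = some d := rfl
      have hdne0 : d ≠ '0' := by
        intro hcon
        subst hcon
        exact hlz ⟨by simp, by simp⟩
      have hds : fnn_decSuffix (d :: t) = some ((d :: t).foldl (fun v c => 10 * v + ((c.toNat : Int) - 48)) 0) := by
        unfold fnn_decSuffix
        rw [if_neg (by simp [hallds]), if_neg ?_]
        rintro ⟨hh, -⟩
        rw [hdhead, Option.some.injEq] at hh
        exact hdne0 hh
      obtain ⟨hw0, hwds⟩ := ih _ hds
      set w := (d :: t).foldl (fun v c => 10 * v + ((c.toNat : Int) - 48)) 0 with hwdef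
      have hdd : ∀ e ∈ (d :: t : List Char), ('0' ≤ e ∧ e ≤ '9') := by
        intro e he
        have := List.all_eq_true.mp hallds e he
        rw [Bool.and_eq_true] at this
        exact ⟨by simpa using this.1, by simpa using this.2⟩
      have hd48 : 48 ≤ d.toNat ∧ d.toNat ≤ 57 := ⟨(hdd d (by simp)).1, (hdd d (by simp)).2⟩
      have hdne48 : d.toNat ≠ 48 := by
        intro hcon
        apply hdne0
        have : Char.ofNat d.toNat = Char.ofNat 48 := by rw [hcon]
        rwa [Char.ofNat_toNat] at this
      have hw1 : 1 ≤ w := by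
        rw [hwdef]
        simp only [List.foldl_cons, mul_zero, zero_add]
        have := fnn_fold_le t ((d.toNat : Int) - 48) (by omega) (fun e he => hdd e (by simp [he]))
        omega
      have hv : v = 10 * w + ((c.toNat : Int) - 48) := by
        simp only [List.foldl_cons, List.foldl_nil] at hfold
        omega
      have hv0 : 0 ≤ v := by omega
      refine ⟨hv0, ?_⟩
      have hvge : 10 ≤ v.toNat := by omega
      rw [Nat.toDigits_of_base_le (by norm_num) hvge]
      have hdivmod : v.toNat / 10 = w.toNat ∧ v.toNat % 10 = c.toNat - 48 := by omega
      rw [hdivmod.1, hdivmod.2, ← hwds, fnn_digitChar_eq c hc0 hc9]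

-- ---- membership in B's 'used' set ----

def fnn_step {α β : Type} [DecidableEq β] (p : α → Option β) (s : PySem.Set β) (x : α) :
    PySem.Set β :=
  match p x with
  | some v => PySem.Set.add s v
  | none => s

theorem fnn_foldl_filterMap {α β : Type} [DecidableEq β] (p : α → Option β) (lst : List α)
    (s0 : PySem.Set β) :
    lst.foldl (fnn_step p) s0 = (lst.filterMap p).foldl PySem.Set.add s0 := by
  induction lst generalizing s0 with
  | nil => rfl
  | cons x rest ih =>
    simp only [List.foldl_cons, List.filterMap_cons]
    cases hx : p x <;> simp [ih, fnn_step, hx]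

def fnn_pick (pref ext : String) (name : String) : Option Int :=
  if PySem.Str.startswith name pref && PySem.Str.endswith name ext then
    fnn_decSuffix (find_new_name_mid pref ext name).toList
  else none

theorem fnn_used_eq_ofList (pref ext : String) (lst : List String) :
    find_new_name_used pref ext lst = PySem.Set.ofList (lst.filterMap (fnn_pick pref ext)) := by
  unfold find_new_name_used
  have hbody : (fun (used : PySem.Set Int) name =>
      if PySem.Str.startswith name pref && PySem.Str.endswith name ext then
        match fnn_decSuffix (find_new_name_mid pref ext name).toList with
        | some v => PySem.Set.add used v
        | none => used
      else used)
    = fnn_step (fnn_pick pref ext) := by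
    funext used name
    unfold fnn_step fnn_pick
    by_cases h : (PySem.Str.startswith name pref && PySem.Str.endswith name ext) = true
    · simp only [if_pos h]
      cases fnn_decSuffix (find_new_name_mid pref ext name).toList <;> rfl
    · simp only [if_neg h]
  rw [hbody, fnn_foldl_filterMap (fnn_pick pref ext) lst PySem.Set.empty,
    PySem.Set.ofList_eq_foldl]
  rfl

theorem fnn_mem_used (pref ext : String) (lst : List String) (v : Int) :
    v ∈ find_new_name_used pref ext lst ↔
      (0 ≤ v ∧ (pref ++ PySem.Int.toStr v ++ ext) ∈ lst) := by
  rw [fnn_used_eq_ofList, PySem.Set.mem_ofList, List.mem_filterMap]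
  have hs : (PySem.Int.toStr v).toList ≠ [] := by
    rw [PySem.Int.toList_toStr]; exact fnn_toChars_ne_nil v
  constructor
  · rintro ⟨name, hmem, hf⟩
    unfold fnn_pick at hf
    by_cases ht : (PySem.Str.startswith name pref && PySem.Str.endswith name ext) = true
    · rw [if_pos ht] at hf
      obtain ⟨hv0, hcs⟩ := fnn_decSuffix_sound _ _ hf
      have hmid : find_new_name_mid pref ext name = PySem.Int.toStr v := by
        rw [← String.toList_inj, PySem.Int.toList_toStr, fnn_toChars_of_nonneg v hv0]
        exact hcs
      have hname := (fnn_mid_iff_str pref ext (PySem.Int.toStr v) name hs).mp ⟨ht, hmid⟩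
      exact ⟨hv0, hname ▸ hmem⟩
    · rw [if_neg ht] at hf; exact absurd hf (by simp)
  · rintro ⟨hv0, hmem⟩
    refine ⟨pref ++ PySem.Int.toStr v ++ ext, hmem, ?_⟩
    obtain ⟨ht, hmid⟩ := (fnn_mid_iff_str pref ext (PySem.Int.toStr v) _ hs).mpr rfl
    unfold fnn_pick
    rw [if_pos ht, hmid, PySem.Int.toList_toStr, fnn_toChars_of_nonneg v hv0,
      fnn_decSuffix_toDigits, Int.toNat_of_nonneg hv0]

-- ---- the mex fold ----

theorem fnn_mex_const (xs : List Int) (m : Int) (h : ∀ x ∈ xs, x ≠ m) :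
    xs.foldl (fun a v => if v = a then a + 1 else a) m = m := by
  induction xs with
  | nil => rfl
  | cons x rest ih =>
    simp only [List.foldl_cons, if_neg (h x (by simp))]
    exact ih (fun y hy => h y (by simp [hy]))

theorem fnn_mex_spec (xs : List Int) (m : Int) (hs : xs.Pairwise (· < ·)) :
    m ≤ xs.foldl (fun a v => if v = a then a + 1 else a) m ∧
      xs.foldl (fun a v => if v = a then a + 1 else a) m ∉ xs ∧
      ∀ n, m ≤ n → n < xs.foldl (fun a v => if v = a then a + 1 else a) m → n ∈ xs := by
  induction xs generalizing m with
  | nil => exact ⟨le_refl m, by simp, fun n h1 h2 => absurd h1 (by simp at h2; omega)⟩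
  | cons x rest ih =>
    have hrest := (List.pairwise_cons.mp hs).2
    have hgt := (List.pairwise_cons.mp hs).1
    by_cases hx : x = m
    · subst hx
      rw [List.foldl_cons, if_pos rfl]
      obtain ⟨h1, h2, h3⟩ := ih (x + 1) hrest
      refine ⟨by omega, ?_, ?_⟩
      · intro hmem
        rcases List.mem_cons.mp hmem with h | h
        · omega
        · exact h2 h
      · intro n hn1 hn2
        by_cases hnx : n = x
        · simp [hnx]
        · exact List.mem_cons_of_mem _ (h3 n (by omega) hn2)
    · rw [List.foldl_cons, if_neg hx]
      by_cases hlt : x < m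
      · obtain ⟨h1, h2, h3⟩ := ih m hrest
        refine ⟨h1, ?_, ?_⟩
        · intro hmem
          rcases List.mem_cons.mp hmem with h | h
          · omega
          · exact h2 h
        · intro n hn1 hn2
          exact List.mem_cons_of_mem _ (h3 n hn1 hn2)
      · -- m < x: every element of x :: rest exceeds m, the fold is constant
        have hconst : rest.foldl (fun a v => if v = a then a + 1 else a) m = m :=
          fnn_mex_const rest m (fun y hy => by have := hgt y hy; omega)
        rw [hconst]
        refine ⟨le_refl m, ?_, fun n h1 h2 => absurd h1 (by omega)⟩
        intro hmem
        rcases List.mem_cons.mp hmem with h | h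
        · omega
        · have := hgt _ h; omega

-- ---- A's loop as a find? ----

theorem fnn_loopA_eq_find (img_name ext : String) (lst : List String) (ks : List Int) :
    find_new_name_loopA img_name lst ext ks
      = (ks.find? (fun k => (PySem.List.index? lst (img_name ++ "_" ++ PySem.Int.toStr k ++ ext)).isNone)).map
          (fun k => img_name ++ "_" ++ PySem.Int.toStr k) := by
  induction ks with
  | nil => rfl
  | cons k ks ih =>
    rw [find_new_name_loopA]
    cases h : PySem.List.index? lst (img_name ++ "_" ++ PySem.Int.toStr k ++ ext) with
    | none => rw [List.find?_cons_of_pos (by rw [h]; rfl)]; rfl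
    | some i => rw [List.find?_cons_of_neg (by rw [h]; simp)]; exact ih

theorem fnn_find_pyRange (p : Int → Bool) (m N : Int) (h0 : 0 ≤ m) (hN : m < N)
    (hp : p m = true) (hlt : ∀ j : Int, 0 ≤ j → j < m → p j = false) :
    (PySem.List.pyRange 0 N 1).find? p = some m := by
  rw [PySem.List.pyRange_one_append 0 m N h0 (le_of_lt hN), List.find?_append]
  have h1 : (PySem.List.pyRange 0 m 1).find? p = none := by
    rw [List.find?_eq_none]
    intro x hx
    have := (PySem.List.mem_pyRange_one).mp hx
    simp [hlt x this.1 this.2]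
  rw [h1, PySem.List.pyRange_one_cons hN, List.find?_cons_of_pos hp]
  rfl

-- str(·) is injective on the naturals (via the parser roundtrip), hence so are the candidates
theorem fnn_toStr_nat_inj (a b : Nat)
    (h : PySem.Int.toStr (a : Int) = PySem.Int.toStr (b : Int)) : a = b := by
  have hl := congrArg String.toList h
  rw [PySem.Int.toList_toStr, PySem.Int.toList_toStr,
    fnn_toChars_of_nonneg _ (Int.natCast_nonneg a), fnn_toChars_of_nonneg _ (Int.natCast_nonneg b),
    Int.toNat_natCast, Int.toNat_natCast] at hl
  have ha := fnn_decSuffix_toDigits a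
  rw [hl, fnn_decSuffix_toDigits b, Option.some.injEq] at ha
  exact_mod_cast ha.symm

theorem fnn_cand_inj (img_name ext : String) (a b : Nat)
    (h : img_name ++ "_" ++ PySem.Int.toStr (a : Int) ++ ext
        = img_name ++ "_" ++ PySem.Int.toStr (b : Int) ++ ext) : a = b := by
  apply fnn_toStr_nat_inj a b
  have hl := congrArg String.toList h
  simp only [String.toList_append, List.append_assoc] at hl
  have h1 := List.append_cancel_left (List.append_cancel_left hl)
  rw [← String.toList_inj]
  exact List.append_cancel_right h1

-- a list shorter than 10000 cannot contain all 10000 distinct candidate names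
theorem fnn_exists_of_short (img_name ext : String) (lst : List String)
    (hlen : lst.length < 10000) :
    ∃ k ∈ List.range 10000, (img_name ++ "_" ++ PySem.Int.toStr (k : Int) ++ ext) ∉ lst := by
  by_contra hno
  push_neg at hno
  have hnodup : ((List.range 10000).map
      (fun k : Nat => img_name ++ "_" ++ PySem.Int.toStr (k : Int) ++ ext)).Nodup :=
    List.Nodup.map (fun a b hab => fnn_cand_inj img_name ext a b hab) List.nodup_range
  have hsub : ((List.range 10000).map
      (fun k : Nat => img_name ++ "_" ++ PySem.Int.toStr (k : Int) ++ ext)) ⊆ lst := by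
    intro x hx
    obtain ⟨k, hk, rfl⟩ := List.mem_map.mp hx
    exact hno k hk
  have hle : ((List.range 10000).map
      (fun k : Nat => img_name ++ "_" ++ PySem.Int.toStr (k : Int) ++ ext)).length ≤ lst.length := by
    classical
    calc _ = ((List.range 10000).map
        (fun k : Nat => img_name ++ "_" ++ PySem.Int.toStr (k : Int) ++ ext)).toFinset.card :=
          (List.toFinset_card_of_nodup hnodup).symm
      _ ≤ lst.toFinset.card := Finset.card_le_card (by
          intro x hx
          rw [List.mem_toFinset] at hx ⊢
          exact hsub hx)
      _ ≤ lst.length := lst.toFinset_card_le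
  simp only [List.length_map, List.length_range] at hle
  omega

-- ===== VERDICT (by name: the statement is the Claim_ definition above) =====
theorem find_new_name_spec : Claim_equal_find_new_name := by
  intro img_name same_date_file_list ext _hdom hpre
  unfold Pre_find_new_name at hpre
  have hex : ∃ k ∈ List.range 10000,
      (img_name ++ "_" ++ PySem.Int.toStr (k : Int) ++ ext) ∉ same_date_file_list := by
    rcases hpre with hlen | hex
    · exact fnn_exists_of_short img_name ext same_date_file_list hlen
    · exact hex
  obtain ⟨k0, hk0r, hk0not⟩ := hex
  have hk0lt : k0 < 10000 := List.mem_range.mp hk0r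
  unfold Spec_find_new_name find_new_name
  have hB : find_new_name_alt img_name same_date_file_list ext
      = (if 10000 ≤ (PySem.List.sorted (find_new_name_used (img_name ++ "_") ext same_date_file_list) (fun v => v) false).foldl (fun m v => if v = m then m + 1 else m) 0
         then ""
         else (img_name ++ "_") ++ PySem.Int.toStr ((PySem.List.sorted (find_new_name_used (img_name ++ "_") ext same_date_file_list) (fun v => v) false).foldl (fun m v => if v = m then m + 1 else m) 0)) := rfl
  rw [hB]
  set S := PySem.List.sorted (find_new_name_used (img_name ++ "_") ext same_date_file_list) (fun v => v) false with hSdef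
  have hpair : S.Pairwise (· < ·) := by
    rw [hSdef, fnn_used_eq_ofList]
    exact PySem.List.sorted_ofList_pairwise_lt _
  obtain ⟨hM0, hMnot, hMint⟩ := fnn_mex_spec S 0 hpair
  set M := S.foldl (fun m v => if v = m then m + 1 else m) 0 with hMdef
  have hmemS : ∀ x : Int, x ∈ S ↔
      (0 ≤ x ∧ ((img_name ++ "_") ++ PySem.Int.toStr x ++ ext) ∈ same_date_file_list) := by
    intro x
    rw [hSdef, PySem.List.mem_sorted, fnn_mem_used]
  have hk0S : ((k0 : Int)) ∉ S := by
    rw [hmemS]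
    rintro ⟨-, hmem⟩
    exact hk0not hmem
  have hMlt : M < 10000 := by
    by_contra hge
    refine hk0S (hMint (k0 : Int) (Int.natCast_nonneg k0) ?_)
    omega
  rw [if_neg (by omega)]
  have hp : (fun k => (PySem.List.index? same_date_file_list (img_name ++ "_" ++ PySem.Int.toStr k ++ ext)).isNone) M = true := by
    have hnot : ((img_name ++ "_") ++ PySem.Int.toStr M ++ ext) ∉ same_date_file_list := by
      intro hmem
      exact hMnot ((hmemS M).mpr ⟨hM0, hmem⟩)
    show (PySem.List.index? same_date_file_list (img_name ++ "_" ++ PySem.Int.toStr M ++ ext)).isNone = true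
    rw [(PySem.List.index?_eq_none_iff _ _).mpr hnot]
    rfl
  have hlt : ∀ j : Int, 0 ≤ j → j < M →
      (fun k => (PySem.List.index? same_date_file_list (img_name ++ "_" ++ PySem.Int.toStr k ++ ext)).isNone) j = false := by
    intro j hj0 hjM
    have hmem := ((hmemS j).mp (hMint j hj0 hjM)).2
    obtain ⟨i, hi⟩ := Option.isSome_iff_exists.mp ((PySem.List.index?_isSome_iff _ _).mpr hmem)
    show (PySem.List.index? same_date_file_list (img_name ++ "_" ++ PySem.Int.toStr j ++ ext)).isNone = false
    rw [hi]
    rfl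
  rw [fnn_loopA_eq_find,
    fnn_find_pyRange (fun k => (PySem.List.index? same_date_file_list (img_name ++ "_" ++ PySem.Int.toStr k ++ ext)).isNone) M 10000 hM0 hMlt hp hlt]
  rfl
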